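-- pv_equiv track=rewrite | github.com/leechangsu2131/my-skills | skills/social-class-helper/social_class_helper.py | resource_match_score
-- ===== SOURCE A (Python) =====
-- from typing import Any, Dict, Iterable, List, Optional
--
-- def normalize_space(text: str) -> str:
--     return " ".join((text or "").split())
--
-- def normalize_match_text(text: str) -> str:
--     return normalize_space(text).lower()
--
-- def resource_match_score(text: str, keywords: Iterable[str]) -> int:
--     normalized_text = normalize_match_text(text)
--     best_score = 0
--     for keyword in keywords:
--         normalized_keyword = normalize_match_text(keyword)
--         if normalized_keyword and normalized_keyword in normalized_text:
--             best_score = max(best_score, len(normalized_keyword))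
--     return best_score
-- ===== SOURCE B (Python) =====
-- def normalize_space(text):
--     return " ".join((text or "").split())
--
-- def normalize_match_text(text):
--     return normalize_space(text).lower()
--
-- def resource_match_score(text, keywords):
--     normalized_text = normalize_match_text(text)
--     candidates = [nk for nk in (normalize_match_text(k) for k in keywords) if nk]
--     candidates.sort(key=len, reverse=True)
--     for nk in candidates:
--         if nk in normalized_text:
--             return len(nk)
--     return 0
-- ===== Notes on version B (the rewrite author's own statement) =====
-- stated objective: faster
-- what changed: Replaces the running-max scan that substring-checks every keyword with: normalize, filter empties, sort by length descending, and return the length of the first normalized keyword contained in the text (early exit).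
import Mathlib
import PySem

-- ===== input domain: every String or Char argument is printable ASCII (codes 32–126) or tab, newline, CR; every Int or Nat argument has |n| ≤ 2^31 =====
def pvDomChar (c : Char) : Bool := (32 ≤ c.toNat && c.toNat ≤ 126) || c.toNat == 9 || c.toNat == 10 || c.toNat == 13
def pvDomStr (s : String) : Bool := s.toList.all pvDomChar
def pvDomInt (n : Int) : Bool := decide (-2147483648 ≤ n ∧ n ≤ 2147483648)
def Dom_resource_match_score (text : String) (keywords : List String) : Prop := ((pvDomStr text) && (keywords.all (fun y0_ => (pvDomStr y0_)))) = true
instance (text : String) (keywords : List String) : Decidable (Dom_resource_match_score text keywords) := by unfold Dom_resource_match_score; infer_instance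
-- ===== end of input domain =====

-- B replaces A's running-max scan over all keywords by sort-by-length-descending + first-containment-hit (alternative decomposition, same result).


-- ===== PORT A =====
-- normalize_space: " ".join((text or "").split()); for a str argument (text or "") = text ('' is falsy and stays '')
def pvNormSpace (s : String) : String := PySem.Str.join " " (PySem.Str.split₀ s)
-- normalize_match_text
def pvNorm (s : String) : String := PySem.Str.lower (pvNormSpace s)

def resource_match_score (text : String) (keywords : List String) : Int :=
  let normalized_text := pvNorm text
  keywords.foldl
    (fun best_score keyword =>
      let nk := pvNorm keyword
      if nk ≠ "" ∧ PySem.Str.isIn nk normalized_text = true then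
        max best_score (PySem.Str.len nk)
      else best_score)
    0

-- ===== PORT B =====
def resource_match_score_alt (text : String) (keywords : List String) : Int :=
  let normalized_text := pvNorm text
  let candidates := (keywords.map pvNorm).filter (fun nk => nk ≠ "")
  let sortedc := PySem.List.sorted candidates (fun nk => PySem.Str.len nk) (reverse := true)
  match sortedc.find? (fun nk => PySem.Str.isIn nk normalized_text) with
  | some nk => PySem.Str.len nk
  | none => 0

-- ===== PRECONDITION & SPEC =====
def Spec_resource_match_score (text : String) (keywords : List String) (out : Int) : Prop := out = resource_match_score_alt text keywords
instance (text : String) (keywords : List String) (out : Int) : Decidable (Spec_resource_match_score text keywords out) := by unfold Spec_resource_match_score; infer_instance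

-- ===== CLAIM (what is proved, stated in full; the proofs are below) =====
def Claim_equal_resource_match_score : Prop := ∀ (text : String) (keywords : List String), Dom_resource_match_score text keywords → Spec_resource_match_score text keywords (resource_match_score text keywords)

-- ===== LEMMAS AND PROOFS =====

-- the loop body of A restricted to the non-empty normalized candidates
def pvStep (nt : String) (b : Int) (nk : String) : Int :=
  if PySem.Str.isIn nk nt = true then max b (PySem.Str.len nk) else b

theorem pvStep_rcomm (nt : String) (b : Int) (x y : String) :
    pvStep nt (pvStep nt b x) y = pvStep nt (pvStep nt b y) x := by
  unfold pvStep; split_ifs <;> (simp [PySem.Str.len_eq]; try omega)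

-- A's loop over keywords is the pvStep-fold over the mapped list (foldl_map, then filter out the empties)
theorem pvBridge (nt : String) (ks : List String) (b : Int) :
    ks.foldl (fun best keyword =>
        let nk := pvNorm keyword
        if nk ≠ "" ∧ PySem.Str.isIn nk nt = true then max best (PySem.Str.len nk) else best) b
      = (ks.map pvNorm).foldl (fun best nk =>
          if nk ≠ "" ∧ PySem.Str.isIn nk nt = true then max best (PySem.Str.len nk) else best) b :=
  (List.foldl_map (f := pvNorm)
    (g := fun best nk => if nk ≠ "" ∧ PySem.Str.isIn nk nt = true then max best (PySem.Str.len nk) else best)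
    (l := ks) (init := b)).symm

theorem pvFoldFilter (nt : String) (l : List String) (b : Int) :
    l.foldl (fun best nk =>
        if nk ≠ "" ∧ PySem.Str.isIn nk nt = true then max best (PySem.Str.len nk) else best) b
      = (l.filter (fun nk => nk ≠ "")).foldl (pvStep nt) b := by
  induction l generalizing b with
  | nil => rfl
  | cons x t ih =>
    rw [List.foldl_cons]
    by_cases h : x = ""
    · rw [if_neg (by tauto), List.filter_cons_of_neg (by simp [h]), ih]
    · rw [List.filter_cons_of_pos (by simp [h]), List.foldl_cons]
      by_cases h2 : PySem.Str.isIn x nt = true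
      · rw [if_pos ⟨h, h2⟩, ih, pvStep, if_pos h2]
      · rw [if_neg (by tauto), ih, pvStep, if_neg h2]

theorem pvLen_nonneg (s : String) : 0 ≤ PySem.Str.len s := by
  simp [PySem.Str.len_eq]

theorem pvFold_const (nt : String) (l : List String) (a : Int)
    (h : ∀ m ∈ l, PySem.Str.len m ≤ a) : l.foldl (pvStep nt) a = a := by
  induction l with
  | nil => rfl
  | cons x t ih =>
    have hx := h x (by simp)
    rw [List.foldl_cons, pvStep]
    have hm : max a (PySem.Str.len x) = a := by omega
    split_ifs <;> [rw [hm]; skip] <;> exact ih (fun m hm' => h m (by simp [hm']))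

-- on a length-descending list the fold of pvStep from 0 is the first hit's length
theorem pvFold_sorted (nt : String) (l : List String)
    (hp : l.Pairwise (fun a b => PySem.Str.len b ≤ PySem.Str.len a)) :
    l.foldl (pvStep nt) 0 =
      (match l.find? (fun nk => PySem.Str.isIn nk nt) with
       | some nk => PySem.Str.len nk
       | none => 0) := by
  induction l with
  | nil => rfl
  | cons x t ih =>
    rcases List.pairwise_cons.mp hp with ⟨hle, hpt⟩
    by_cases hx : PySem.Str.isIn x nt = true
    · rw [List.foldl_cons, List.find?_cons_of_pos (by simpa using hx)]
      have h0 : pvStep nt 0 x = PySem.Str.len x := by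
        have := pvLen_nonneg x; rw [pvStep, if_pos hx]; omega
      rw [h0, pvFold_const nt t _ hle]
    · rw [List.foldl_cons, List.find?_cons_of_neg (by simpa using hx)]
      have h0 : pvStep nt 0 x = 0 := by rw [pvStep, if_neg hx]
      rw [h0, ih hpt]

-- ===== VERDICT (by name: the statement is the Claim_ definition above) =====
theorem resource_match_score_spec : Claim_equal_resource_match_score := by
  intro text keywords _
  unfold Spec_resource_match_score resource_match_score resource_match_score_alt
  rw [pvBridge, pvFoldFilter]
  set nt := pvNorm text
  set cands := (keywords.map pvNorm).filter (fun nk => nk ≠ "")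
  have hperm : cands.Perm (PySem.List.sorted cands (fun nk => PySem.Str.len nk) true) :=
    (PySem.List.sorted_perm cands (fun nk => PySem.Str.len nk) true).symm
  rw [@List.Perm.foldl_eq _ _ (pvStep nt) _ _ ⟨pvStep_rcomm nt⟩ hperm 0]
  exact pvFold_sorted nt _ (PySem.List.sorted_pairwise_rev cands (fun nk => PySem.Str.len nk))
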